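-- pv_equiv track=rewrite | github.com/WenruiYu/ghTrader | src/ghtrader/trading/execution.py | _split_volume
-- ===== SOURCE A (Python) =====
-- def _split_volume(volume: int, max_order_size: int) -> list[int]:
--     if volume <= 0:
--         return []
--     if max_order_size <= 0:
--         raise ValueError("max_order_size must be > 0")
--     out: list[int] = []
--     left = int(volume)
--     while left > 0:
--         v = min(left, max_order_size)
--         out.append(v)
--         left -= v
--     return out
-- ===== SOURCE B (Python) =====
-- def _split_volume(volume: int, max_order_size: int) -> list[int]:
--     if volume <= 0:
--         return []
--     if max_order_size <= 0:
--         raise ValueError("max_order_size must be > 0")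
--     full, rem = divmod(int(volume), max_order_size)
--     return [max_order_size] * full + ([rem] if rem else [])
-- ===== Notes on version B (the rewrite author's own statement) =====
-- stated objective: simpler
-- what changed: Replaces the subtraction loop with a closed-form divmod: the number of full chunks and the remainder are computed arithmetically and the list is built with replication.
import Mathlib
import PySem

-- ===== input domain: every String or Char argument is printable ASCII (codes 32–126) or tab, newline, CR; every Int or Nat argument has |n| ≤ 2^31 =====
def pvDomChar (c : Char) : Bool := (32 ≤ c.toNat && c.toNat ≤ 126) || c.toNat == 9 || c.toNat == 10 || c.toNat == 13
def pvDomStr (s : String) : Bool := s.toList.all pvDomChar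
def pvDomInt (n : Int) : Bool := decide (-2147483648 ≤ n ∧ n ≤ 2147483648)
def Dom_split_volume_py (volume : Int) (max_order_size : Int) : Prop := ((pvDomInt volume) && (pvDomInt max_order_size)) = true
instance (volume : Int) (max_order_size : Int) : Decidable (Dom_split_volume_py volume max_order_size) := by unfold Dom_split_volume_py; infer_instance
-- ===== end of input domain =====

-- B replaces A's subtraction loop with a closed-form divmod (simpler; same chunk list).


-- ===== PORT A =====
-- the while loop, with fuel = left.toNat (enough: each iteration subtracts at least 1 when max_order_size > 0)
def splitLoopA (fuel : Nat) (left : Int) (mos : Int) (out : List Int) : List Int :=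
  match fuel with
  | 0 => out
  | f + 1 =>
    if left > 0 then
      let v := min left mos
      splitLoopA f (left - v) mos (out ++ [v])
    else out

def split_volume_py (volume : Int) (max_order_size : Int) : List Int :=
  if volume ≤ 0 then []
  else if max_order_size ≤ 0 then []  -- Python raises ValueError here; excluded by Pre_
  else splitLoopA volume.toNat volume max_order_size []

-- ===== PORT B =====
def split_volume_py_alt (volume : Int) (max_order_size : Int) : List Int :=
  if volume ≤ 0 then []
  else if max_order_size ≤ 0 then []  -- Python raises ValueError here; excluded by Pre_
  else
    let full := PySem.Int.floordiv volume max_order_size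
    let rem := PySem.Int.mod volume max_order_size
    List.replicate full.toNat max_order_size ++ (if rem ≠ 0 then [rem] else [])

-- ===== PRECONDITION & SPEC =====
-- Pre_ excludes exactly the inputs (volume > 0 ∧ max_order_size ≤ 0) where Python A raises ValueError.
def Pre_split_volume_py (volume : Int) (max_order_size : Int) : Prop :=
  volume ≤ 0 ∨ 0 < max_order_size
instance (volume : Int) (max_order_size : Int) : Decidable (Pre_split_volume_py volume max_order_size) := by unfold Pre_split_volume_py; infer_instance
def pvWitness_split_volume_py : Int × Int := (7, 3)

def Spec_split_volume_py (volume : Int) (max_order_size : Int) (out : List Int) : Prop := out = split_volume_py_alt volume max_order_size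
instance (volume : Int) (max_order_size : Int) (out : List Int) : Decidable (Spec_split_volume_py volume max_order_size out) := by unfold Spec_split_volume_py; infer_instance

-- ===== CLAIM (what is proved, stated in full; the proofs are below) =====
def Claim_equal_split_volume_py : Prop := ∀ (volume : Int) (max_order_size : Int), Dom_split_volume_py volume max_order_size → Pre_split_volume_py volume max_order_size → Spec_split_volume_py volume max_order_size (split_volume_py volume max_order_size)

-- ===== LEMMAS AND PROOFS =====
lemma splitLoopA_closed (fuel : Nat) (left mos : Int) (acc : List Int)
    (hl : 0 < left) (hm : 0 < mos) (hf : left.toNat ≤ fuel) :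
    splitLoopA fuel left mos acc =
      acc ++ List.replicate (left / mos).toNat mos ++ (if left % mos ≠ 0 then [left % mos] else []) := by
  induction fuel generalizing left acc with
  | zero => omega
  | succ f ih =>
    simp only [splitLoopA, hl, if_pos]
    by_cases h : left ≤ mos
    · -- v = left; next left is 0, loop stops
      have hv : min left mos = left := min_eq_left h
      rw [hv]
      have hstop : splitLoopA f (left - left) mos (acc ++ [left]) = acc ++ [left] := by
        simp [splitLoopA]
        cases f <;> simp [splitLoopA]
      rw [hstop]
      rcases eq_or_lt_of_le h with heq | hlt
      · subst heq
        have : left / left = 1 := Int.ediv_self (by omega)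
        simp [this, Int.emod_self]
      · have hdiv : left / mos = 0 := Int.ediv_eq_zero_of_lt (by omega) hlt
        have hmod : left % mos = left := Int.emod_eq_of_lt (by omega) hlt
        simp [hdiv, hmod, hl.ne']
    · -- v = mos; recurse
      push_neg at h
      have hv : min left mos = mos := min_eq_right h.le
      rw [hv]
      have hrec := ih (left - mos) (acc ++ [mos]) (by omega) (by omega)
      rw [hrec]
      have hdiv : left / mos = (left - mos) / mos + 1 := by
        rw [show left = (left - mos) + 1 * mos by ring, Int.add_mul_ediv_right _ _ (by omega : mos ≠ 0)]
        ring
      have hmod : left % mos = (left - mos) % mos := (Int.sub_emod_right left mos).symm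
      have hpos : 0 ≤ (left - mos) / mos := Int.ediv_nonneg (by omega) (by omega)
      have htn : (left / mos).toNat = ((left - mos) / mos).toNat + 1 := by
        rw [hdiv]; omega
      rw [hmod, htn, List.replicate_succ]
      simp

-- ===== VERDICT (by name: the statement is the Claim_ definition above) =====
theorem split_volume_py_spec : Claim_equal_split_volume_py := by
  intro v m _ hpre
  unfold Spec_split_volume_py split_volume_py split_volume_py_alt
  by_cases hv : v ≤ 0
  · simp [hv]
  · have hm : 0 < m := by rcases hpre with h | h; omega; exact h
    push_neg at hv
    simp only [if_neg (by omega : ¬ v ≤ 0), if_neg (by omega : ¬ m ≤ 0)]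
    rw [splitLoopA_closed v.toNat v m [] hv hm (le_refl _)]
    rw [PySem.Int.floordiv_eq_ediv_of_pos hm, PySem.Int.mod_eq_emod_of_pos hm]
    simp
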